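-- pv_equiv track=rewrite | github.com/MrBrantCode/unitest_baseline | mut_generate/mist_train_cf/cf_88518/solution.py | check_palindrome_vowels
-- ===== SOURCE A (Python) =====
-- def check_palindrome_vowels(string):
--     vowels = ['u', 'o', 'i', 'e', 'a']  # Vowels in reverse alphabetical order
--     string = string.lower()  # Convert string to lowercase for case-insensitive comparison
--
--     # Check if string is a palindrome
--     if string != string[::-1]:
--         return False
--
--     # Check if string length is greater than 10
--     if len(string) <= 10:
--         return False
--
--     # Check if string contains all vowels in reverse alphabetical order
--     for vowel in vowels:
--         if vowel not in string:
--             return False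
--
--     # Check if string contains any duplicate vowels
--     vowel_set = set()
--     for char in string:
--         if char in vowels:
--             if char in vowel_set:
--                 return False
--             vowel_set.add(char)
--
--     return True
-- ===== SOURCE B (Python) =====
-- def check_palindrome_vowels(string):
--     s = string.lower()
--     if s != s[::-1]:
--         return False
--     if len(s) <= 10:
--         return False
--     # extract the vowel occurrences and compare their sorted sequence with the canonical one:
--     # it equals "aeiou" exactly when every vowel occurs exactly once
--     return sorted(c for c in s if c in "aeiou") == list("aeiou")
-- ===== Notes on version B (the rewrite author's own statement) =====
-- stated objective: simpler
-- what changed: Replaces A's per-vowel presence loop and set-tracking duplicate loop with extract-and-canonicalize: filter out the vowel occurrences, sort them, and compare the result to the literal ['a','e','i','o','u'], which holds iff every vowel occurs exactly once.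
import Mathlib
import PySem

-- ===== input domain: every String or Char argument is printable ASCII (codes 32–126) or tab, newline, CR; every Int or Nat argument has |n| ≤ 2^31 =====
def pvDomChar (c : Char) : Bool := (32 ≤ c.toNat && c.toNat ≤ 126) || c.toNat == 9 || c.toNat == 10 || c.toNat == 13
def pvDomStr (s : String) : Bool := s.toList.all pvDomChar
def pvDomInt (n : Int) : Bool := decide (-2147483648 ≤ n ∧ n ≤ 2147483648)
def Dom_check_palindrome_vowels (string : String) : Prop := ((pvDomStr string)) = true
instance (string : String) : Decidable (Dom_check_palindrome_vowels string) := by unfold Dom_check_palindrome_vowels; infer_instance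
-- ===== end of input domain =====

-- B replaces A's per-vowel presence loop and set-tracking duplicate loop with extract-and-canonicalize:
-- filter out the vowel occurrences, sort them, and compare with ['a','e','i','o','u'] (objective: simpler).

-- ===== PORT A =====
-- the 'for char in string' duplicate-vowel loop of A, with its growing vowel_set
def pvA_dupLoop (vowels : List Char) : List Char → PySem.Set Char → Bool
  | [], _ => true
  | c :: rest, seen =>
    if c ∈ vowels then
      if c ∈ seen then false
      else pvA_dupLoop vowels rest (PySem.Set.add seen c)
    else pvA_dupLoop vowels rest seen

def check_palindrome_vowels (string : String) : Bool :=
  let vowels : List Char := ['u', 'o', 'i', 'e', 'a']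
  let s := PySem.Chars.lower string.toList
  if some s ≠ PySem.Chars.slice? s none none (-1) then false
  else if s.length ≤ 10 then false
  -- 'for vowel in vowels: if vowel not in string: return False' (substring test, single-char needles)
  else if vowels.any (fun v => !(PySem.Chars.isIn [v] s)) then false
  else pvA_dupLoop vowels s PySem.Set.empty

-- ===== PORT B =====
def check_palindrome_vowels_alt (string : String) : Bool :=
  let s := PySem.Chars.lower string.toList
  if some s ≠ PySem.Chars.slice? s none none (-1) then false
  else if s.length ≤ 10 then false
  else
    -- sorted(c for c in s if c in "aeiou") == list("aeiou")
    PySem.List.sorted (s.filter (fun c => PySem.Chars.isIn [c] (String.toList "aeiou"))) (fun x => x) false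
      == String.toList "aeiou"

-- ===== PRECONDITION & SPEC =====
def Spec_check_palindrome_vowels (string : String) (out : Bool) : Prop := out = check_palindrome_vowels_alt string
instance (string : String) (out : Bool) : Decidable (Spec_check_palindrome_vowels string out) := by unfold Spec_check_palindrome_vowels; infer_instance

-- ===== CLAIM (what is proved, stated in full; the proofs are below) =====
def Claim_equal_check_palindrome_vowels : Prop := ∀ (string : String), Dom_check_palindrome_vowels string → Spec_check_palindrome_vowels string (check_palindrome_vowels string)

-- ===== LEMMAS AND PROOFS =====

-- single-char substring test is membership
lemma pv_isIn_singleton (v : Char) (s : List Char) :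
    PySem.Chars.isIn [v] s = true ↔ v ∈ s := by
  rw [PySem.Chars.isIn_iff_infix]
  constructor
  · intro h; exact h.sublist.subset (by simp)
  · intro h
    obtain ⟨l1, l2, rfl⟩ := List.append_of_mem h
    exact ⟨l1, l2, by simp⟩

-- invariant of A's duplicate-vowel loop
lemma pvA_dupLoop_iff (vowels : List Char) (rest : List Char) (seen : PySem.Set Char) :
    pvA_dupLoop vowels rest seen = true ↔
      ∀ v ∈ vowels, rest.count v + (if v ∈ seen then 1 else 0) ≤ 1 := by
  induction rest generalizing seen with
  | nil =>
    simp only [pvA_dupLoop, List.count_nil, true_iff]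
    intro v _
    split <;> omega
  | cons c rest ih =>
    have hcc : ∀ v : Char, (c :: rest).count v = rest.count v + (if v = c then 1 else 0) := by
      intro v
      by_cases h : v = c
      · subst h; simp
      · simp [h, Ne.symm h]
    by_cases hc : c ∈ vowels
    · by_cases hseen : c ∈ seen
      · simp only [pvA_dupLoop, if_pos hc, if_pos hseen, Bool.false_eq_true, false_iff]
        intro h
        have := h c hc
        rw [hcc c, if_pos rfl, if_pos hseen] at this
        omega
      · simp only [pvA_dupLoop, if_pos hc, if_neg hseen, ih]
        constructor
        · intro h v hv
          have := h v hv
          have hadd : v ∈ PySem.Set.add seen c ↔ v ∈ seen ∨ v = c := PySem.Set.mem_add seen c v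
          rw [hcc v]
          by_cases hvc : v = c
          · subst hvc
            rw [if_pos (hadd.mpr (Or.inr rfl))] at this
            rw [if_pos rfl, if_neg hseen]
            omega
          · rw [if_neg hvc]
            by_cases hvs : v ∈ seen
            · rw [if_pos (hadd.mpr (Or.inl hvs))] at this; rw [if_pos hvs]; omega
            · rw [if_neg (fun h => (hadd.mp h).elim hvs hvc)] at this; rw [if_neg hvs]; omega
        · intro h v hv
          have := h v hv
          have hadd : v ∈ PySem.Set.add seen c ↔ v ∈ seen ∨ v = c := PySem.Set.mem_add seen c v
          rw [hcc v] at this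
          by_cases hvc : v = c
          · subst hvc
            rw [if_pos rfl, if_neg hseen] at this
            rw [if_pos (hadd.mpr (Or.inr rfl))]
            omega
          · rw [if_neg hvc] at this
            by_cases hvs : v ∈ seen
            · rw [if_pos hvs] at this; rw [if_pos (hadd.mpr (Or.inl hvs))]; omega
            · rw [if_neg hvs] at this; rw [if_neg (fun h => (hadd.mp h).elim hvs hvc)]; omega
    · simp only [pvA_dupLoop, if_neg hc, ih]
      constructor <;>
      · intro h v hv
        have := h v hv
        have hne : v ≠ c := fun e => hc (e ▸ hv)
        rw [hcc v] at *
        rw [if_neg hne] at *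
        exact this

-- count in a filtered list
lemma pv_count_filter (p : Char → Bool) (s : List Char) (a : Char) :
    (s.filter p).count a = if p a then s.count a else 0 := by
  induction s with
  | nil => simp
  | cons c rest ih =>
    by_cases hac : c = a
    · subst hac
      by_cases hpc : p c
      · simp [hpc, ih]
      · simp [hpc, ih]
    · by_cases hpa : p a <;> by_cases hpc : p c <;>
        simp [hpc, hpa, ih, hac]

-- B's sorted-extract test holds iff each vowel occurs exactly once in s
lemma pv_sorted_iff (s : List Char) :
    (PySem.List.sorted (s.filter (fun c => PySem.Chars.isIn [c] (String.toList "aeiou"))) (fun x => x) false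
       = String.toList "aeiou")
    ↔ ∀ v ∈ (['a','e','i','o','u'] : List Char), s.count v = 1 := by
  have hstr : String.toList "aeiou" = (['a','e','i','o','u'] : List Char) := by decide
  rw [hstr]
  set p : Char → Bool := fun c => PySem.Chars.isIn [c] (['a','e','i','o','u'] : List Char) with hp
  have hpmem : ∀ c, p c = true ↔ c ∈ (['a','e','i','o','u'] : List Char) := fun c => pv_isIn_singleton c _
  constructor
  · intro h v hv
    have hperm : (s.filter p).Perm (['a','e','i','o','u'] : List Char) := by
      have := PySem.List.sorted_perm (s.filter p) (fun x : Char => x) false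
      rw [h] at this
      exact this.symm
    have := (List.perm_iff_count.mp hperm) v
    rw [pv_count_filter p s v, if_pos ((hpmem v).mpr hv)] at this
    rw [this]
    fin_cases hv <;> decide
  · intro h
    apply PySem.List.sorted_eq_of_perm_of_pairwise_lt
    · rw [List.perm_iff_count]
      intro a
      rw [pv_count_filter p s a]
      by_cases ha : a ∈ (['a','e','i','o','u'] : List Char)
      · rw [if_pos ((hpmem a).mpr ha), h a ha]
        fin_cases ha <;> decide
      · rw [if_neg (fun hc => ha ((hpmem a).mp hc))]
        exact List.count_eq_zero.mpr ha
    · decide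
  
-- the core equality behind the guards
lemma pv_core (s : List Char) :
    (if (['u','o','i','e','a'] : List Char).any (fun v => !(PySem.Chars.isIn [v] s)) then false
     else pvA_dupLoop ['u','o','i','e','a'] s PySem.Set.empty)
    = (PySem.List.sorted (s.filter (fun c => PySem.Chars.isIn [c] (String.toList "aeiou"))) (fun x => x) false
        == String.toList "aeiou") := by
  have hempty : ∀ v : Char, (if v ∈ (PySem.Set.empty : PySem.Set Char) then 1 else 0) = 0 := by
    intro v; rw [if_neg (by simp [PySem.Set.empty])]
  have hsetiff : ∀ v : Char, v ∈ (['u','o','i','e','a'] : List Char) ↔ v ∈ (['a','e','i','o','u'] : List Char) := by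
    intro v; constructor <;> (intro h; fin_cases h <;> simp)
  by_cases hB : (PySem.List.sorted (s.filter (fun c => PySem.Chars.isIn [c] (String.toList "aeiou"))) (fun x => x) false
       = String.toList "aeiou")
  · have hcnt := (pv_sorted_iff s).mp hB
    have hcnt' : ∀ v ∈ (['u','o','i','e','a'] : List Char), s.count v = 1 :=
      fun v hv => hcnt v ((hsetiff v).mp hv)
    rw [if_neg ?_]
    · rw [(pvA_dupLoop_iff _ _ _).mpr ?_, (beq_iff_eq ..).mpr hB]
      intro v hv; rw [hempty v, hcnt' v hv]
    · simp only [List.any_eq_true, not_exists, not_and]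
      intro v hv
      have : v ∈ s := List.one_le_count_iff.mp (by rw [hcnt' v hv])
      simp [(pv_isIn_singleton v s).mpr this]
  · have hBfalse : (PySem.List.sorted (s.filter (fun c => PySem.Chars.isIn [c] (String.toList "aeiou"))) (fun x => x) false
        == String.toList "aeiou") = false := by
      simpa using hB
    rw [hBfalse]
    have hnot : ¬ ∀ v ∈ (['a','e','i','o','u'] : List Char), s.count v = 1 :=
      fun hc => hB ((pv_sorted_iff s).mpr hc)
    push Not at hnot
    obtain ⟨v, hv, hne⟩ := hnot
    by_cases hmiss : v ∈ s
    · -- v present but count ≠ 1, so count ≥ 2: the dup loop fails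
      have h2 : 2 ≤ s.count v := by
        have := List.one_le_count_iff.mpr hmiss
        omega
      split
      · rfl
      · rename_i hany
        by_contra hcon
        have hT : pvA_dupLoop ['u','o','i','e','a'] s PySem.Set.empty = true := by
          revert hcon; cases pvA_dupLoop ['u','o','i','e','a'] s PySem.Set.empty <;> simp
        have := (pvA_dupLoop_iff _ _ _).mp hT v ((hsetiff v).mpr hv)
        rw [hempty v] at this
        omega
    · -- v absent: the presence loop fails
      rw [if_pos ?_]
      simp only [List.any_eq_true]
      refine ⟨v, (hsetiff v).mpr hv, ?_⟩
      simp only [Bool.not_eq_true']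
      rw [← Bool.not_eq_true]
      intro hIn
      exact hmiss ((pv_isIn_singleton v s).mp hIn)

-- ===== VERDICT (by name: the statement is the Claim_ definition above) =====
theorem check_palindrome_vowels_spec : Claim_equal_check_palindrome_vowels := by
  intro string _
  unfold Spec_check_palindrome_vowels check_palindrome_vowels check_palindrome_vowels_alt
  simp only []
  by_cases hp : some (PySem.Chars.lower string.toList) ≠ PySem.Chars.slice? (PySem.Chars.lower string.toList) none none (-1)
  · rw [if_pos hp, if_pos hp]
  · rw [if_neg hp, if_neg hp]
    by_cases hl : (PySem.Chars.lower string.toList).length ≤ 10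
    · rw [if_pos hl, if_pos hl]
    · rw [if_neg hl, if_neg hl]
      exact pv_core _
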